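-- pv_equiv track=rewrite | github.com/CycloneBoy/ml-learn | nlp/word/MainWindow.py | remove_same_prefix
-- ===== SOURCE A (Python) =====
-- def remove_same_prefix(data):
--     res_list = list(set(data))
--     res_list.sort(key=lambda x: len(x), reverse=True)
--
--     res = []
--     before = ""
--     for index, word in enumerate(res_list):
--         if index == 0:
--             before = word
--             res.append(before)
--         else:
--             flag = False
--             for one_word in res:
--                 if one_word.startswith(word):
--                     flag = True
--                     break
--             if not flag:
--                 res.append(word)
--
--     # remove_input_str = self.read_input()
--     # res = self.remove_input(res, remove_input_str)
--
--     res.sort()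
--     return res
-- ===== SOURCE B (Python) =====
-- def remove_same_prefix(data):
--     # Sort the distinct words; a word is a proper prefix of some other word
--     # iff it is a prefix of its immediate lexicographic successor.
--     ws = sorted(set(data))
--     res = []
--     for w, nxt in zip(ws, ws[1:]):
--         if not nxt.startswith(w):
--             res.append(w)
--     if ws:
--         res.append(ws[-1])
--     return res
-- ===== Notes on version B (the rewrite author's own statement) =====
-- stated objective: faster
-- what changed: Instead of scanning the whole kept list for every word of a length-descending pass (quadratic in the number of words), B sorts the distinct words lexicographically once and keeps a word iff its immediate successor does not start with it (a word is a prefix of some other distinct word iff it is a prefix of its sorted successor).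
import Mathlib
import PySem

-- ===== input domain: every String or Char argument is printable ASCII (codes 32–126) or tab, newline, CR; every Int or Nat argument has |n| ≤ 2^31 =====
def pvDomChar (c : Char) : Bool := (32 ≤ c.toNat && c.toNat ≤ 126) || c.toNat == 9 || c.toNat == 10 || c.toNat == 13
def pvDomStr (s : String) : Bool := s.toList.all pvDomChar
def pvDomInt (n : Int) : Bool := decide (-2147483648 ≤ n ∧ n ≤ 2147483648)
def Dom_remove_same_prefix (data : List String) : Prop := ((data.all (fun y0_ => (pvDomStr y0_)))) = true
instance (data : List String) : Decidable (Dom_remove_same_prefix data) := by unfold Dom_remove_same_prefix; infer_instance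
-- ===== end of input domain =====

-- B keeps the words that are not a prefix of another distinct word by sorting the distinct
-- words once and checking each word only against its immediate lexicographic successor,
-- instead of A's inner scan of the kept list for every word.

-- ===== PORT A =====
-- A's `before` variable is only assigned and immediately appended (never read afterwards),
-- so the loop state is just `res`; the inner for/break scan over `res` is `List.any`.
def remove_same_prefix (data : List String) : List String :=
  let res_list := PySem.List.sorted (PySem.Set.ofList data) (fun x => PySem.Str.len x) true
  let res := (PySem.List.enumerate res_list).foldl
    (fun res p =>
      if p.1 == 0 then res ++ [p.2]
      else if res.any (fun one_word => PySem.Str.startswith one_word p.2) then res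
      else res ++ [p.2]) []
  PySem.List.sorted res (fun x => x)

-- ===== PORT B =====
def remove_same_prefix_alt (data : List String) : List String :=
  let ws := PySem.List.sorted (PySem.Set.ofList data) (fun x => x)
  let res := (ws.zip (ws.drop 1)).foldl
    (fun res p => if PySem.Str.startswith p.2 p.1 then res else res ++ [p.1]) []
  match ws.getLast? with
  | some w => res ++ [w]
  | none => res

-- ===== PRECONDITION & SPEC =====
def Spec_remove_same_prefix (data : List String) (out : List String) : Prop := out = remove_same_prefix_alt data
instance (data : List String) (out : List String) : Decidable (Spec_remove_same_prefix data out) := by unfold Spec_remove_same_prefix; infer_instance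

-- ===== CLAIM (what is proved, stated in full; the proofs are below) =====
def Claim_equal_remove_same_prefix : Prop := ∀ (data : List String), Dom_remove_same_prefix data → Spec_remove_same_prefix data (remove_same_prefix data)

-- ===== LEMMAS AND PROOFS =====

-- `pvMax S w` : w is not a prefix of another word of S (the words both programs keep).
def pvMax (S : List String) (w : String) : Bool := decide (∀ v ∈ S, w.toList <+: v.toList → v = w)

-- A's loop body with the index stripped (the index-0 branch coincides with it on the empty accumulator).
def pvG (res : List String) (w : String) : List String :=
  if res.any (fun r => PySem.Str.startswith r w) then res else res ++ [w]

-- B's loop output as filter-map over adjacent pairs plus the last element.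
def pvB (ws : List String) : List String :=
  (((ws.zip (ws.drop 1)).filter (fun p => !(PySem.Str.startswith p.2 p.1))).map (·.1)) ++
    (match ws.getLast? with | some w => [w] | none => [])

-- A proper prefix is lexicographically smaller.
theorem pv_prefix_lt {w v : List Char} (h : w <+: v) (hne : w ≠ v) : w < v := by
  obtain ⟨t, rfl⟩ := h
  induction w with
  | nil =>
    cases t with
    | nil => exact absurd rfl hne
    | cons c t' => exact List.Lex.nil
  | cons a w' ih =>
    rw [List.cons_append]
    exact List.Lex.cons (ih (fun he => hne (by rw [List.cons_append, ← he])))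

-- Anything lexicographically between a word and one of its extensions also extends the word.
theorem pv_prefix_between {w s v : List Char} (hpv : w <+: v) (hws : w = s ∨ w < s)
    (hsv : s = v ∨ s < v) : w <+: s := by
  induction w generalizing s v with
  | nil => exact List.nil_prefix
  | cons a w' ih =>
    obtain ⟨t, rfl⟩ := hpv
    rcases hws with rfl | hws
    · exact List.prefix_refl _
    · cases s with
      | nil => cases hws
      | cons b s' =>
        rcases hsv with heq | hsv
        · exact heq ▸ ⟨t, rfl⟩
        · cases hws with
          | rel hab =>
            cases hsv with
            | rel hba => exact absurd hab (lt_asymm hba)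
            | cons h2 => exact absurd hab (lt_irrefl _)
          | cons h1 =>
            cases hsv with
            | rel hba => exact absurd hba (lt_irrefl _)
            | cons h2 => exact List.cons_prefix_cons.mpr ⟨rfl, ih ⟨t, rfl⟩ (Or.inr h1) (Or.inr h2)⟩

theorem pv_len_lt {w v : String} (h : w.toList <+: v.toList) (hne : v ≠ w) :
    w.toList.length < v.toList.length := by
  rcases lt_or_eq_of_le h.length_le with h' | h'
  · exact h'
  · exact absurd (String.toList_inj.mp (h.eq_of_length h')).symm hne

theorem pv_filter_len_lt {α : Type} (l : List α) (p q : α → Bool) (x : α) (hx : x ∈ l)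
    (hpx : p x = true) (hqx : q x = false) (h : ∀ y, q y = true → p y = true) :
    (l.filter q).length < (l.filter p).length := by
  have hsub : List.Sublist (l.filter q) (l.filter p) := List.monotone_filter_right l h
  rcases lt_or_eq_of_le hsub.length_le with h' | h'
  · exact h'
  · exfalso
    have he := hsub.eq_of_length h'
    have hxp : x ∈ l.filter p := List.mem_filter.mpr ⟨hx, hpx⟩
    rw [← he] at hxp
    have := (List.mem_filter.mp hxp).2
    simp [hqx] at this

-- Every word of S extends to a word that is maximal in S (no further extension in S).
theorem pv_exists_max (S : List String) : ∀ (n : Nat) (v : String),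
    (S.filter (fun u => decide (v.toList.length < u.toList.length))).length ≤ n → v ∈ S →
    ∃ u ∈ S, v.toList <+: u.toList ∧ pvMax S u = true := by
  intro n
  induction n with
  | zero =>
    intro v hn hv
    by_cases hm : pvMax S v = true
    · exact ⟨v, hv, List.prefix_refl _, hm⟩
    · exfalso
      have : ∃ u ∈ S, v.toList <+: u.toList ∧ u ≠ v := by
        simpa [pvMax, not_forall] using hm
      obtain ⟨u, hu, hp, hne⟩ := this
      have hlt := pv_len_lt hp hne
      have : u ∈ S.filter (fun u => decide (v.toList.length < u.toList.length)) :=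
        List.mem_filter.mpr ⟨hu, by simpa using hlt⟩
      have := List.length_pos_of_mem this
      omega
  | succ n ih =>
    intro v hn hv
    by_cases hm : pvMax S v = true
    · exact ⟨v, hv, List.prefix_refl _, hm⟩
    · have : ∃ u ∈ S, v.toList <+: u.toList ∧ u ≠ v := by
        simpa [pvMax, not_forall] using hm
      obtain ⟨v', hv', hp, hne⟩ := this
      have hlt := pv_len_lt hp hne
      have hdec : (S.filter (fun u => decide (v'.toList.length < u.toList.length))).length <
          (S.filter (fun u => decide (v.toList.length < u.toList.length))).length := by
        apply pv_filter_len_lt S _ _ v' hv' (by simpa using hlt) (by simp)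
        intro y hy
        simp only [decide_eq_true_eq] at *
        omega
      obtain ⟨u, hu, hp', hm'⟩ := ih v' (by omega) hv'
      exact ⟨u, hu, hp.trans hp', hm'⟩

-- A non-maximal word has a maximal strict extension in S.
theorem pv_notmax_witness {S : List String} {w : String} (h : pvMax S w = false) :
    ∃ u ∈ S, u ≠ w ∧ w.toList <+: u.toList ∧ pvMax S u = true := by
  have : ∃ v ∈ S, w.toList <+: v.toList ∧ v ≠ w := by
    simpa [pvMax, not_forall] using h
  obtain ⟨v, hv, hp, hne⟩ := this
  obtain ⟨u, hu, hp', hm⟩ := pv_exists_max S _ v le_rfl hv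
  refine ⟨u, hu, ?_, hp.trans hp', hm⟩
  intro he
  have h1 := pv_len_lt hp hne
  have h2 := hp'.length_le
  rw [he] at h2
  omega

-- The inner scan of A fires exactly on the non-maximal words, provided all strict
-- extensions of w that lie in S are already in P.
theorem pv_any_iff {S P : List String} {w : String} (hwP : w ∉ P)
    (hsubP : ∀ x ∈ P, x ∈ S) (hlong : ∀ v ∈ S, v ≠ w → w.toList <+: v.toList → v ∈ P) :
    (P.filter (pvMax S)).any (fun r => PySem.Str.startswith r w) = !(pvMax S w) := by
  cases hm : pvMax S w with
  | true =>
    simp only [Bool.not_true, List.any_eq_false]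
    intro r hr
    have hrf := List.mem_filter.mp hr
    intro hsw
    have hp : w.toList <+: r.toList := by
      rw [PySem.Str.startswith_eq] at hsw
      exact (PySem.Chars.startswith_iff _ _).mp hsw
    have : r = w := (of_decide_eq_true hm) r (hsubP r hrf.1) hp
    exact hwP (this ▸ hrf.1)
  | false =>
    simp only [Bool.not_false, List.any_eq_true]
    obtain ⟨u, hu, hne, hp, hmu⟩ := pv_notmax_witness hm
    refine ⟨u, List.mem_filter.mpr ⟨hlong u hu hne hp, hmu⟩, ?_⟩
    rw [PySem.Str.startswith_eq]
    exact (PySem.Chars.startswith_iff _ _).mpr hp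

-- Invariant of A's loop over the length-descending list: the kept words are the maximal ones.
theorem pv_loopA (S : List String) : ∀ (Q P : List String),
    (∀ v ∈ S, v ∈ P ++ Q) → (∀ x ∈ P ++ Q, x ∈ S) → (P ++ Q).Nodup →
    List.Pairwise (fun a b => PySem.Str.len b ≤ PySem.Str.len a) (P ++ Q) →
    Q.foldl pvG (P.filter (pvMax S)) = (P ++ Q).filter (pvMax S) := by
  intro Q
  induction Q with
  | nil => intro P _ _ _ _; simp
  | cons w Q' ih =>
    intro P hmem hsub hnd hpw
    have hw : w ∈ S := hsub w (by simp)
    have hwP : w ∉ P := fun hP => (List.nodup_append.mp hnd).2.2 w hP w (List.mem_cons_self) rfl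
    have hlong : ∀ v ∈ S, v ≠ w → w.toList <+: v.toList → v ∈ P := by
      intro v hv hne hp
      have hlt := pv_len_lt hp hne
      rcases List.mem_append.mp (hmem v hv) with h | h
      · exact h
      · exfalso
        rcases List.mem_cons.mp h with rfl | h
        · omega
        · have hsl : List.Pairwise (fun a b => PySem.Str.len b ≤ PySem.Str.len a) (w :: Q') :=
            hpw.sublist (List.sublist_append_right P _)
          have := (List.pairwise_cons.mp hsl).1 v h
          simp only [PySem.Str.len_eq] at this
          omega
    have hstep : pvG (P.filter (pvMax S)) w = (P ++ [w]).filter (pvMax S) := by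
      unfold pvG
      rw [pv_any_iff hwP (fun x hx => hsub x (List.mem_append_left _ hx)) hlong]
      cases hm : pvMax S w with
      | true => simp [List.filter_append, hm]
      | false => simp [List.filter_append, hm]
    rw [List.foldl_cons, hstep]
    have hpq : P ++ w :: Q' = (P ++ [w]) ++ Q' := by simp
    rw [hpq] at hmem hsub hnd hpw ⊢
    exact ih (P ++ [w]) hmem hsub hnd hpw

-- From index 1 on, A's loop body is pvG.
theorem pv_enum_tail : ∀ (t : List String) (i : Int), 1 ≤ i → ∀ (res : List String),
    (PySem.List.enumerate t i).foldl
      (fun res p =>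
        if p.1 == 0 then res ++ [p.2]
        else if res.any (fun one_word => PySem.Str.startswith one_word p.2) then res
        else res ++ [p.2]) res = t.foldl pvG res := by
  intro t
  induction t with
  | nil => intro i hi res; simp [PySem.List.enumerate]
  | cons w t' ih =>
    intro i hi res
    have h0 : (i == 0) = false := by simp; omega
    simp only [PySem.List.enumerate, List.foldl_cons, h0]
    rw [ih (i+1) (by omega)]
    rfl

-- At index 0 the accumulator is empty, so the index-0 branch is pvG as well.
theorem pv_bridgeA (L : List String) :
    (PySem.List.enumerate L).foldl
      (fun res p =>
        if p.1 == 0 then res ++ [p.2]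
        else if res.any (fun one_word => PySem.Str.startswith one_word p.2) then res
        else res ++ [p.2]) [] = L.foldl pvG [] := by
  cases L with
  | nil => simp [PySem.List.enumerate]
  | cons w t =>
    simp only [PySem.List.enumerate, List.foldl_cons]
    rw [show PySem.List.enumerate t ((0:Int)+1) = PySem.List.enumerate t 1 from by norm_num]
    simp only [beq_self_eq_true, if_true, List.nil_append]
    rw [pv_enum_tail t 1 le_rfl]
    simp [pvG]

theorem pv_alt_eq_pvB (data : List String) :
    remove_same_prefix_alt data = pvB (PySem.List.sorted (PySem.Set.ofList data) (fun x => x)) := by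
  unfold remove_same_prefix_alt pvB
  have hf : (fun (res : List String) (p : String × String) =>
      if PySem.Str.startswith p.2 p.1 then res else res ++ [p.1]) =
      (fun res p => if !(PySem.Str.startswith p.2 p.1) then res ++ [p.1] else res) := by
    funext res p
    cases PySem.Str.startswith p.2 p.1 <;> simp
  rw [hf]
  dsimp only
  rw [PySem.List.foldl_append_if]
  cases h : (PySem.List.sorted (PySem.Set.ofList data) fun x => x).getLast? <;> simp

-- On a strictly sorted, upward-closed (within S) list, B's successor check keeps
-- exactly the maximal words.
theorem pv_pvB_filter (S : List String) : ∀ (ws : List String),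
    List.Pairwise (· < ·) ws → (∀ x ∈ ws, x ∈ S) →
    (∀ w ∈ ws, ∀ v ∈ S, w < v → v ∈ ws) → pvB ws = ws.filter (pvMax S) := by
  intro ws
  induction ws with
  | nil => intro _ _ _; simp [pvB]
  | cons w rest ih =>
    intro hpw hsub hcl
    cases rest with
    | nil =>
      have hm : pvMax S w = true := by
        rw [pvMax, decide_eq_true_eq]
        intro v hv hp
        by_contra hne
        have hlt : w < v := String.lt_iff_toList_lt.mpr
          (pv_prefix_lt hp (fun he => hne (String.toList_inj.mp he).symm))
        have := hcl w (by simp) v hv hlt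
        simp at this
        exact hne this
      simp [pvB, hm]
    | cons nxt rest' =>
      have hpw' : List.Pairwise (· < ·) (nxt :: rest') := (List.pairwise_cons.mp hpw).2
      have hsub' : ∀ x ∈ nxt :: rest', x ∈ S := fun x hx => hsub x (List.mem_cons_of_mem _ hx)
      have hwlt : ∀ y ∈ nxt :: rest', w < y := (List.pairwise_cons.mp hpw).1
      have hcl' : ∀ w' ∈ nxt :: rest', ∀ v ∈ S, w' < v → v ∈ nxt :: rest' := by
        intro w' hw' v hv hlt
        have hv' := hcl w' (List.mem_cons_of_mem _ hw') v hv hlt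
        rcases List.mem_cons.mp hv' with rfl | h
        · exact absurd (lt_trans (hwlt w' hw') hlt) (lt_irrefl _)
        · exact h
      have hcond : PySem.Str.startswith nxt w = !(pvMax S w) := by
        cases hm : pvMax S w with
        | true =>
          simp only [Bool.not_true]
          by_contra hsw
          simp only [Bool.not_eq_false] at hsw
          have hp : w.toList <+: nxt.toList := by
            rw [PySem.Str.startswith_eq] at hsw
            exact (PySem.Chars.startswith_iff _ _).mp hsw
          have heq := (of_decide_eq_true hm) nxt (hsub' nxt (by simp)) hp
          exact absurd (heq ▸ hwlt nxt (by simp)) (lt_irrefl _)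
        | false =>
          simp only [Bool.not_false]
          have : ∃ v ∈ S, w.toList <+: v.toList ∧ v ≠ w := by
            simpa [pvMax, not_forall] using hm
          obtain ⟨v, hv, hp, hne⟩ := this
          have hlt : w < v := String.lt_iff_toList_lt.mpr
            (pv_prefix_lt hp (fun he => hne (String.toList_inj.mp he).symm))
          have hvin := hcl w (by simp) v hv hlt
          have hvin' : v ∈ nxt :: rest' := by
            rcases List.mem_cons.mp hvin with rfl | h
            · exact absurd hlt (lt_irrefl _)
            · exact h
          have hnv : nxt = v ∨ nxt < v := by
            rcases List.mem_cons.mp hvin' with rfl | h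
            · exact Or.inl rfl
            · exact Or.inr ((List.pairwise_cons.mp hpw').1 v h)
          have hwn : w < nxt := hwlt nxt (by simp)
          have hpn : w.toList <+: nxt.toList := by
            apply pv_prefix_between hp (Or.inr (String.lt_iff_toList_lt.mp hwn))
            rcases hnv with rfl | h
            · exact Or.inl rfl
            · exact Or.inr (String.lt_iff_toList_lt.mp h)
          rw [PySem.Str.startswith_eq]
          exact (PySem.Chars.startswith_iff _ _).mpr hpn
      have hstep : pvB (w :: nxt :: rest') =
          (if pvMax S w then [w] else []) ++ pvB (nxt :: rest') := by
        simp only [pvB, List.drop_succ_cons, List.drop_zero, List.zip_cons_cons,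
          List.filter_cons, List.getLast?_cons_cons, hcond]
        cases hm : pvMax S w <;> simp
      rw [hstep, ih hpw' hsub' hcl']
      cases hm : pvMax S w <;> simp [List.filter_cons, hm]

theorem pv_main (data : List String) : remove_same_prefix data = remove_same_prefix_alt data := by
  have hS : (PySem.Set.ofList data : List String).Nodup := PySem.Set.nodup_ofList data
  set S : List String := PySem.Set.ofList data with hSdef
  set L : List String := PySem.List.sorted S (fun x => PySem.Str.len x) true with hLdef
  set ws : List String := PySem.List.sorted S (fun x => x) with hwsdef
  have hLS : L.Perm S := PySem.List.sorted_perm S _ true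
  have hwsS : ws.Perm S := PySem.List.sorted_perm S _ false
  have hA : remove_same_prefix data = PySem.List.sorted (L.filter (pvMax S)) (fun x => x) := by
    unfold remove_same_prefix
    dsimp only
    rw [← hSdef, ← hLdef, pv_bridgeA L]
    congr 1
    have := pv_loopA S L []
    simp only [List.nil_append, List.filter_nil] at this
    apply this
    · intro v hv; exact (PySem.List.mem_sorted _ _ _ _).mpr hv
    · intro x hx; exact (PySem.List.mem_sorted _ _ _ _).mp hx
    · exact hLS.symm.nodup hS
    · exact PySem.List.sorted_pairwise_rev S (fun x => PySem.Str.len x)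
  have hB : remove_same_prefix_alt data = ws.filter (pvMax S) := by
    rw [pv_alt_eq_pvB data, ← hSdef, ← hwsdef]
    apply pv_pvB_filter
    · exact PySem.List.sorted_ofList_pairwise_lt data
    · intro x hx; exact (PySem.List.mem_sorted _ _ _ _).mp hx
    · intro w _ v hv _; exact (PySem.List.mem_sorted _ _ _ _).mpr hv
  rw [hA, hB]
  apply PySem.List.sorted_eq_of_perm_of_pairwise_lt
  · exact (hwsS.trans hLS.symm).filter (pvMax S)
  · exact List.Pairwise.sublist List.filter_sublist (PySem.List.sorted_ofList_pairwise_lt data)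

-- ===== VERDICT (by name: the statement is the Claim_ definition above) =====
theorem remove_same_prefix_spec : Claim_equal_remove_same_prefix := by
  intro data _
  unfold Spec_remove_same_prefix
  exact pv_main data
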